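-- pv_equiv track=rewrite | github.com/thesavant42/dockerdorker | app/ui/widgets/build_info/widget.py | _format_instruction
-- ===== SOURCE A (Python) =====
-- def _escape_markup(text: str) -> str:
--     """Escape square brackets in text to prevent markup interpretation."""
--     return text.replace("[", r"\[").replace("]", r"\]")
--
-- def _format_instruction(instruction: str, instruction_type: str, max_length: int = 80) -> str:
--     """Format a long instruction with line breaks at logical points.
--
--     Args:
--         instruction: The instruction text to format.
--         instruction_type: The instruction type (RUN, COPY, etc.).
--         max_length: Maximum length before splitting.
--
--     Returns:
--         Formatted instruction with line breaks at && or | if needed.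
--     """
--     # Escape markup characters first
--     instruction = _escape_markup(instruction)
--
--     if len(instruction) <= max_length:
--         return instruction
--
--     # Split at && or | if present
--     if " && " in instruction:
--         parts = instruction.split(" && ")
--         formatted = parts[0]
--         indent = " " * (len(instruction_type) + 2)  # "  RUN: " = 6 spaces
--         for part in parts[1:]:
--             formatted += "\n" + indent + "&& " + part
--         return formatted
--     elif " | " in instruction:
--         parts = instruction.split(" | ")
--         formatted = parts[0]
--         indent = " " * (len(instruction_type) + 2)
--         for part in parts[1:]:
--             formatted += "\n" + indent + "| " + part
--         return formatted
--
--     return instruction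
-- ===== SOURCE B (Python) =====
-- def _escape_markup(text: str) -> str:
--     """Escape square brackets, character by character."""
--     return "".join("\\" + c if c in "[]" else c for c in text)
--
-- def _format_instruction(instruction: str, instruction_type: str, max_length: int = 80) -> str:
--     """Format a long instruction with line breaks at && or | if needed.
--
--     Same return value as A, but computed by a single left-to-right character
--     scan: at each position the chosen separator is either matched (emitting
--     newline + indent + tag) or one character is copied; no split/replace.
--     """
--     instruction = _escape_markup(instruction)
--     if len(instruction) <= max_length:
--         return instruction
--     indent = " " * (len(instruction_type) + 2)
--     for sep, tag in ((" && ", "&& "), (" | ", "| ")):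
--         if sep in instruction:
--             out = []
--             i = 0
--             n = len(instruction)
--             while i < n:
--                 if instruction.startswith(sep, i):
--                     out.append("\n" + indent + tag)
--                     i += len(sep)
--                 else:
--                     out.append(instruction[i])
--                     i += 1
--             return "".join(out)
--     return instruction
-- ===== Notes on version B (the rewrite author's own statement) =====
-- stated objective: alternative
-- what changed: B replaces A's split-into-parts + string-accumulator loop by a single left-to-right character scan with an explicit index (match the separator at the position and emit newline+indent+tag, or copy one character), and escapes brackets per character instead of chained replaces.
import Mathlib
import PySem

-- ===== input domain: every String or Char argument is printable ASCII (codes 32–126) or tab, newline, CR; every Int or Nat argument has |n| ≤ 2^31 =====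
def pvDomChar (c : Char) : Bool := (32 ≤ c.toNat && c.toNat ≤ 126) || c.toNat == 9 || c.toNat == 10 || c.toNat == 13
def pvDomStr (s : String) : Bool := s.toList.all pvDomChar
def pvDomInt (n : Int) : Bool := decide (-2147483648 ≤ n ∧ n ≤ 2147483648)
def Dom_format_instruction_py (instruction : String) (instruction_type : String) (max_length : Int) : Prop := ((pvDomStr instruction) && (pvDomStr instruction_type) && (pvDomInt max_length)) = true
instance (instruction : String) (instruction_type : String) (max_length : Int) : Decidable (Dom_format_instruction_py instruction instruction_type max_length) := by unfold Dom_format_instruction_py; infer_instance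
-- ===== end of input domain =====

-- B replaces A's split-into-parts + accumulator loop by a single left-to-right character
-- scan (match separator at position or copy one character) and escapes brackets per
-- character; same return value (objective: alternative).

-- ===== PORT A =====
-- port of A's _escape_markup: two chained str.replace calls
def pvEscapeMarkupA (text : String) : String :=
  PySem.Str.replace (PySem.Str.replace text "[" "\\[") "]" "\\]"

def format_instruction_py (instruction : String) (instruction_type : String) (max_length : Int) : String :=
  let instruction := pvEscapeMarkupA instruction
  if PySem.Str.len instruction ≤ max_length then instruction
  else if PySem.Str.isIn " && " instruction then
    -- parts = instruction.split(" && "); formatted = parts[0]; loop over parts[1:]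
    let parts := PySem.Chars.splitOn instruction.toList " && ".toList
    let indent := List.replicate (instruction_type.toList.length + 2) ' '
    String.ofList (List.foldl
      (fun formatted part => formatted ++ "\n".toList ++ indent ++ "&& ".toList ++ part)
      (parts.headD []) parts.tail)   -- split never returns []: parts[0] = headD
  else if PySem.Str.isIn " | " instruction then
    let parts := PySem.Chars.splitOn instruction.toList " | ".toList
    let indent := List.replicate (instruction_type.toList.length + 2) ' '
    String.ofList (List.foldl
      (fun formatted part => formatted ++ "\n".toList ++ indent ++ "| ".toList ++ part)
      (parts.headD []) parts.tail)
  else instruction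

-- ===== PORT B =====
-- port of B's _escape_markup: per-character escaping, joined
def pvEscapeMarkupB (text : String) : String :=
  String.ofList (text.toList.flatMap (fun c => if c = '[' ∨ c = ']' then ['\\', c] else [c]))

-- port of B's while loop: index i over the string ↦ the remaining suffix; out list ↦ acc
-- (chunks accumulated in reverse, flattened at the end = "".join(out));
-- fuel = remaining length, consumed ≥ 1 per step exactly as i advances
def pvScanB (sep rep : List Char) : Nat → List Char → List Char → List Char
  | _, [], acc => acc.reverse
  | 0, _, acc => acc.reverse
  | fuel+1, c::t, acc =>
    if sep.isPrefixOf (c::t) then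
      pvScanB sep rep fuel (List.drop sep.length (c::t)) (rep.reverse ++ acc)
    else
      pvScanB sep rep fuel t (c :: acc)

def format_instruction_py_alt (instruction : String) (instruction_type : String) (max_length : Int) : String :=
  let instruction := pvEscapeMarkupB instruction
  if PySem.Str.len instruction ≤ max_length then instruction
  else
    let indent := List.replicate (instruction_type.toList.length + 2) ' '
    if PySem.Str.isIn " && " instruction then
      String.ofList (pvScanB " && ".toList ("\n".toList ++ indent ++ "&& ".toList)
        instruction.toList.length instruction.toList [])
    else if PySem.Str.isIn " | " instruction then
      String.ofList (pvScanB " | ".toList ("\n".toList ++ indent ++ "| ".toList)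
        instruction.toList.length instruction.toList [])
    else instruction

-- ===== PRECONDITION & SPEC =====
def Spec_format_instruction_py (instruction : String) (instruction_type : String) (max_length : Int) (out : String) : Prop := out = format_instruction_py_alt instruction instruction_type max_length
instance (instruction : String) (instruction_type : String) (max_length : Int) (out : String) : Decidable (Spec_format_instruction_py instruction instruction_type max_length out) := by unfold Spec_format_instruction_py; infer_instance

-- ===== CLAIM (what is proved, stated in full; the proofs are below) =====
def Claim_equal_format_instruction_py : Prop := ∀ (instruction : String) (instruction_type : String) (max_length : Int), Dom_format_instruction_py instruction instruction_type max_length → Spec_format_instruction_py instruction instruction_type max_length (format_instruction_py instruction instruction_type max_length)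

-- ===== LEMMAS AND PROOFS =====

-- ---- the two escapes agree ----

-- str.replace with a single-character pattern is a per-character flatMap
theorem replace_go_single (a : Char) (new : List Char) :
    ∀ (fuel : Nat) (l acc : List Char), l.length ≤ fuel →
    PySem.Chars.replace.go [a] new fuel l acc =
      acc.reverse ++ l.flatMap (fun c => if c = a then new else [c]) := by
  intro fuel
  induction fuel with
  | zero =>
    intro l acc h
    have : l = [] := List.eq_nil_of_length_eq_zero (Nat.le_zero.mp h)
    subst this; simp [PySem.Chars.replace.go]
  | succ n ih =>
    intro l acc h
    cases l with
    | nil => simp [PySem.Chars.replace.go]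
    | cons c t =>
      rw [show PySem.Chars.replace.go [a] new (n+1) (c::t) acc =
          (if List.isPrefixOf [a] (c::t) then
            PySem.Chars.replace.go [a] new n (List.drop [a].length (c::t)) (new.reverse ++ acc)
           else PySem.Chars.replace.go [a] new n t (c::acc)) from by
        simp [PySem.Chars.replace.go]]
      by_cases hc : c = a
      · subst hc
        rw [if_pos (by simp [List.isPrefixOf])]
        rw [show List.drop [c].length (c::t) = t from by simp]
        rw [ih t _ (by simpa using h)]
        simp
      · rw [if_neg (by simp [List.isPrefixOf]; exact fun hh => (hc hh.symm).elim)]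
        rw [ih t _ (by simpa using h)]
        simp [hc]

theorem replace_single (s : List Char) (a : Char) (new : List Char) :
    PySem.Chars.replace s [a] new = s.flatMap (fun c => if c = a then new else [c]) := by
  unfold PySem.Chars.replace
  rw [if_neg (by simp)]
  rw [replace_go_single a new s.length s [] (le_refl _)]
  simp

theorem escape_eq (text : String) : pvEscapeMarkupA text = pvEscapeMarkupB text := by
  have h : (pvEscapeMarkupA text).toList = (pvEscapeMarkupB text).toList := by
    unfold pvEscapeMarkupA pvEscapeMarkupB
    simp only [PySem.Str.toList_replace, String.toList_ofList]
    rw [show ("[" : String).toList = ['['] from rfl, show ("]" : String).toList = [']'] from rfl,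
      show ("\\[" : String).toList = ['\\', '['] from rfl, show ("\\]" : String).toList = ['\\', ']'] from rfl]
    rw [replace_single, replace_single, List.flatMap_assoc]
    apply List.flatMap_congr
    intro c _
    by_cases h1 : c = '[' <;> by_cases h2 : c = ']' <;> simp [h1, h2]
  have := congrArg String.ofList h
  simpa using this

-- ---- splitOn bookkeeping (used to characterise both A's loop and B's scan) ----

theorem splitOn_go_nil (sep : List Char) (fuel : Nat) (cur : List Char) (accs : List (List Char)) :
    PySem.Chars.splitOn.go sep fuel [] cur accs = (cur.reverse :: accs).reverse := by
  cases fuel <;> simp [PySem.Chars.splitOn.go]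

theorem splitOn_go_cons (sep : List Char) (c : Char) (t cur : List Char) (accs : List (List Char)) (fuel : Nat) :
    PySem.Chars.splitOn.go sep (fuel+1) (c::t) cur accs =
    (if sep.isPrefixOf (c::t) then
        PySem.Chars.splitOn.go sep fuel (List.drop sep.length (c::t)) [] (cur.reverse :: accs)
     else PySem.Chars.splitOn.go sep fuel t (c :: cur) accs) := by
  simp [PySem.Chars.splitOn.go]

theorem splitOn_go_accs (sep : List Char) :
    ∀ (fuel : Nat) (l cur : List Char) (accs : List (List Char)),
    PySem.Chars.splitOn.go sep fuel l cur accs =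
      accs.reverse ++ PySem.Chars.splitOn.go sep fuel l cur [] := by
  intro fuel
  induction fuel with
  | zero => intro l cur accs; cases l <;> simp [PySem.Chars.splitOn.go]
  | succ n ih =>
    intro l cur accs
    cases l with
    | nil => simp [splitOn_go_nil]
    | cons c t =>
      rw [splitOn_go_cons, splitOn_go_cons]
      split_ifs with h
      · rw [ih _ _ (cur.reverse :: accs), ih _ _ ([cur.reverse])]
        simp
      · exact ih _ _ accs

theorem splitOn_go_ne_nil (sep : List Char) :
    ∀ (fuel : Nat) (l cur : List Char) (accs : List (List Char)),
    PySem.Chars.splitOn.go sep fuel l cur accs ≠ [] := by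
  intro fuel
  induction fuel with
  | zero => intro l cur accs; cases l <;> simp [PySem.Chars.splitOn.go]
  | succ n ih =>
    intro l cur accs
    cases l with
    | nil => simp [splitOn_go_nil]
    | cons c t =>
      rw [splitOn_go_cons]
      split_ifs with h
      · exact ih _ _ _
      · exact ih _ _ _

theorem splitOn_go_cur (sep : List Char) :
    ∀ (fuel : Nat) (l cur : List Char),
    PySem.Chars.splitOn.go sep fuel l cur [] =
      (PySem.Chars.splitOn.go sep fuel l [] []).modifyHead (cur.reverse ++ ·) := by
  intro fuel
  induction fuel with
  | zero => intro l cur; cases l <;> simp [PySem.Chars.splitOn.go]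
  | succ n ih =>
    intro l cur
    cases l with
    | nil => simp [splitOn_go_nil]
    | cons c t =>
      rw [splitOn_go_cons, splitOn_go_cons]
      split_ifs with h
      · simp only [List.reverse_nil]
        rw [splitOn_go_accs _ _ _ _ [cur.reverse], splitOn_go_accs _ _ _ _ [[]]]
        obtain ⟨q, qs, hq⟩ := List.exists_cons_of_ne_nil
          (splitOn_go_ne_nil sep n (List.drop sep.length (c::t)) [] [])
        rw [hq]; simp
      · rw [ih t (c :: cur), ih t [c]]
        obtain ⟨q, qs, hq⟩ := List.exists_cons_of_ne_nil (splitOn_go_ne_nil sep n t [] [])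
        rw [hq]; simp

theorem intercalate_cons_cons (sep a b : List Char) (l : List (List Char)) :
    List.intercalate sep (a :: b :: l) = a ++ sep ++ List.intercalate sep (b :: l) := by
  simp [List.intercalate, List.intersperse]

theorem intercalate_head_append (sep x q : List Char) (qs : List (List Char)) :
    List.intercalate sep ((x ++ q) :: qs) = x ++ List.intercalate sep (q :: qs) := by
  cases qs with
  | nil => simp [List.intercalate]
  | cons b l => rw [intercalate_cons_cons, intercalate_cons_cons]; simp

theorem splitOn_go_fuel (sep : List Char) (hsep : sep ≠ []) :
    ∀ (f1 : Nat) (l : List Char) (f2 : Nat) (cur : List Char) (accs : List (List Char)),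
    l.length ≤ f1 → l.length ≤ f2 →
    PySem.Chars.splitOn.go sep f1 l cur accs = PySem.Chars.splitOn.go sep f2 l cur accs := by
  intro f1
  induction f1 with
  | zero =>
    intro l f2 cur accs h1 h2
    have : l = [] := List.eq_nil_of_length_eq_zero (Nat.le_zero.mp h1)
    subst this; rw [splitOn_go_nil, splitOn_go_nil]
  | succ n ih =>
    intro l f2 cur accs h1 h2
    cases l with
    | nil => rw [splitOn_go_nil, splitOn_go_nil]
    | cons c t =>
      cases f2 with
      | zero => simp at h2
      | succ m =>
        rw [splitOn_go_cons, splitOn_go_cons]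
        split_ifs with h
        · have hlen : (List.drop sep.length (c::t)).length ≤ n := by
            have := List.length_pos_of_ne_nil hsep
            simp only [List.length_drop, List.length_cons] at *
            omega
          have hlen2 : (List.drop sep.length (c::t)).length ≤ m := by
            have := List.length_pos_of_ne_nil hsep
            simp only [List.length_drop, List.length_cons] at *
            omega
          exact ih _ m _ _ hlen hlen2
        · exact ih t m _ _ (by simpa using h1) (by simpa using h2)

-- B's scan produces exactly the separator-join of split's pieces
theorem scanB_eq_intercalate (old new : List Char) (hold : old ≠ []) :
    ∀ (fuel : Nat) (l acc : List Char), l.length ≤ fuel →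
    pvScanB old new fuel l acc =
      acc.reverse ++ List.intercalate new (PySem.Chars.splitOn.go old fuel l [] []) := by
  intro fuel
  induction fuel with
  | zero =>
    intro l acc h1
    have : l = [] := List.eq_nil_of_length_eq_zero (Nat.le_zero.mp h1)
    subst this; rw [splitOn_go_nil]; simp [pvScanB, List.intercalate]
  | succ n ih =>
    intro l acc h1
    cases l with
    | nil => rw [splitOn_go_nil]; simp [pvScanB, List.intercalate]
    | cons c t =>
      rw [show pvScanB old new (n+1) (c::t) acc =
          (if old.isPrefixOf (c::t) then
              pvScanB old new n (List.drop old.length (c::t)) (new.reverse ++ acc)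
           else pvScanB old new n t (c :: acc)) from rfl,
        splitOn_go_cons]
      split_ifs with h
      · have hlen : (List.drop old.length (c::t)).length ≤ n := by
          have := List.length_pos_of_ne_nil hold
          simp only [List.length_drop, List.length_cons] at h1 ⊢
          omega
        rw [ih _ _ hlen]
        simp only [List.reverse_nil]
        rw [splitOn_go_accs _ _ _ _ [[]]]
        obtain ⟨q, qs, hq⟩ := List.exists_cons_of_ne_nil
          (splitOn_go_ne_nil old n (List.drop old.length (c::t)) [] [])
        rw [hq]
        rw [show ([[]].reverse ++ q :: qs : List (List Char)) = [] :: q :: qs by simp,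
          intercalate_cons_cons]
        simp
      · rw [ih t (c :: acc) (by simpa using h1), splitOn_go_cur _ _ _ [c]]
        obtain ⟨q, qs, hq⟩ := List.exists_cons_of_ne_nil (splitOn_go_ne_nil old n t [] [])
        rw [hq]
        simp only [List.modifyHead_cons]
        rw [show ([c].reverse ++ q) = [c] ++ q by simp, intercalate_head_append]
        simp

-- A's accumulator loop over parts[1:] builds the separator-join of all parts
theorem foldl_sep_eq_intercalate (x y z : List Char) :
    ∀ (ps : List (List Char)) (p0 : List Char),
    List.foldl (fun f p => f ++ x ++ y ++ z ++ p) p0 ps =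
      List.intercalate (x ++ y ++ z) (p0 :: ps) := by
  intro ps
  induction ps with
  | nil => intro p0; simp [List.intercalate]
  | cons p ps ih =>
    intro p0
    simp only [List.foldl_cons]
    rw [ih (p0 ++ x ++ y ++ z ++ p), intercalate_cons_cons]
    rw [show p0 ++ x ++ y ++ z ++ p = (p0 ++ (x ++ y ++ z)) ++ p by simp]
    rw [intercalate_head_append]

-- one branch: A's loop result = B's scan result
theorem branch_eq (s sep : List Char) (hsep : sep ≠ []) (ind tag : List Char) :
    String.ofList (List.foldl (fun f p => f ++ "\n".toList ++ ind ++ tag ++ p)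
      ((PySem.Chars.splitOn s sep).headD []) (PySem.Chars.splitOn s sep).tail) =
    String.ofList (pvScanB sep ("\n".toList ++ ind ++ tag) s.length s []) := by
  rw [scanB_eq_intercalate sep _ hsep s.length s [] (le_refl _)]
  obtain ⟨q, qs, hq⟩ : ∃ q qs, PySem.Chars.splitOn s sep = q :: qs := by
    have := splitOn_go_ne_nil sep (s.length + 1) s [] []
    unfold PySem.Chars.splitOn
    exact List.exists_cons_of_ne_nil this
  rw [hq]
  simp only [List.headD_cons, List.tail_cons, List.reverse_nil, List.nil_append]
  rw [foldl_sep_eq_intercalate]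
  have : PySem.Chars.splitOn.go sep s.length s [] [] = q :: qs := by
    rw [splitOn_go_fuel sep hsep s.length s (s.length + 1) [] [] (le_refl _) (by omega)]
    unfold PySem.Chars.splitOn at hq
    exact hq
  rw [this]

-- ===== VERDICT (by name: the statement is the Claim_ definition above) =====
theorem format_instruction_py_spec : Claim_equal_format_instruction_py := by
  intro instruction instruction_type max_length _
  unfold Spec_format_instruction_py format_instruction_py format_instruction_py_alt
  rw [← escape_eq]
  simp only []
  split_ifs with h1 h2 h3
  · rfl
  · exact branch_eq _ _ (by decide) _ _
  · exact branch_eq _ _ (by decide) _ _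
  · rfl
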